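-- pv_equiv track=rewrite | github.com/karthikabinav/frontier-pulse | backend/app/services/text_utils.py | strip_reference_tail
-- ===== SOURCE A (Python) =====
-- def strip_reference_tail(text: str) -> str:
--     markers = ["\nreferences", "\nappendix", "\nbibliography"]
--     lower = text.lower()
--     cut = len(text)
--     for marker in markers:
--         idx = lower.find(marker)
--         if idx != -1:
--             cut = min(cut, idx)
--     return text[:cut].strip()
-- ===== SOURCE B (Python) =====
-- def strip_reference_tail(text: str) -> str:
--     lower = text.lower()
--     cut = len(text)
--     for i in range(len(lower)):
--         if lower.startswith(("\nreferences", "\nappendix", "\nbibliography"), i):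
--             cut = i
--             break
--     return text[:cut].strip()
-- ===== Notes on version B (the rewrite author's own statement) =====
-- stated objective: alternative
-- what changed: Replaces three full find() passes combined with a running min by a single left-to-right scan that stops at the first position where any of the three markers starts (leftmost-match scan with break).
import Mathlib
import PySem

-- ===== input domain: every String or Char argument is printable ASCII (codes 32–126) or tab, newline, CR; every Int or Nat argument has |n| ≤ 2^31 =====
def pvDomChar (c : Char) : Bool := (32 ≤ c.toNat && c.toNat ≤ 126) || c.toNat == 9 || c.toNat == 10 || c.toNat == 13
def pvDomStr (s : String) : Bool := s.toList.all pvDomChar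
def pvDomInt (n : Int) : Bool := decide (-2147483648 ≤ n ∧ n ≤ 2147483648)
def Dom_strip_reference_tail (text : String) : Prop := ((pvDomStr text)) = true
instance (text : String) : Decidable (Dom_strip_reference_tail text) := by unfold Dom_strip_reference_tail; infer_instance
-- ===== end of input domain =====

-- B replaces A's three full-text find() passes + running min by one left-to-right
-- scan that stops at the first position where any marker starts (alternative, same cost).


-- ===== PORT A =====
def strip_reference_tail (text : String) : String :=
  let markers : List String := ["\nreferences", "\nappendix", "\nbibliography"]
  let lower := PySem.Str.lower text
  let cut : Int := markers.foldl (fun cut marker =>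
      let idx := PySem.Str.find lower marker
      if idx ≠ -1 then min cut idx else cut) (PySem.Str.len text)
  PySem.Str.strip (PySem.Str.slice text none (some cut))

-- ===== PORT B =====
-- does lower.startswith(("\nreferences","\nappendix","\nbibliography"), i) on a suffix
def pvAnyMarker (s : List Char) : Bool :=
  PySem.Chars.startswith s "\nreferences".toList ||
  PySem.Chars.startswith s "\nappendix".toList ||
  PySem.Chars.startswith s "\nbibliography".toList

-- the for-i-in-range loop with break: first i where a marker starts, else len
def pvScanCut : List Char → Nat
  | [] => 0
  | c :: rest => if pvAnyMarker (c :: rest) then 0 else pvScanCut rest + 1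

def strip_reference_tail_alt (text : String) : String :=
  let lower := PySem.Str.lower text
  let cut : Nat := pvScanCut lower.toList
  PySem.Str.strip (PySem.Str.slice text none (some (cut : Int)))

-- ===== PRECONDITION & SPEC =====
def Spec_strip_reference_tail (text : String) (out : String) : Prop := out = strip_reference_tail_alt text
instance (text : String) (out : String) : Decidable (Spec_strip_reference_tail text out) := by unfold Spec_strip_reference_tail; infer_instance

-- ===== CLAIM (what is proved, stated in full; the proofs are below) =====
def Claim_equal_strip_reference_tail : Prop := ∀ (text : String), Dom_strip_reference_tail text → Spec_strip_reference_tail text (strip_reference_tail text)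

-- ===== LEMMAS AND PROOFS =====

lemma pvScanCut_le_length (s : List Char) : pvScanCut s ≤ s.length := by
  induction s with
  | nil => simp [pvScanCut]
  | cons c rest ih =>
    by_cases hm : pvAnyMarker (c :: rest) = true <;> simp [pvScanCut, hm] <;> omega

lemma pvScanCut_le_of_match (s : List Char) (j : Nat)
    (h : pvAnyMarker (s.drop j) = true) : pvScanCut s ≤ j := by
  induction s generalizing j with
  | nil => simp [pvScanCut]
  | cons c rest ih =>
    by_cases hm : pvAnyMarker (c :: rest) = true
    · simp [pvScanCut, hm]
    · cases j with
      | zero => rw [List.drop_zero] at h; exact absurd h hm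
      | succ j' =>
        have := ih j' (by simpa [List.drop_succ_cons] using h)
        simp [pvScanCut, hm]; omega

lemma pvScanCut_match_or_len (s : List Char) :
    pvScanCut s = s.length ∨ pvAnyMarker (s.drop (pvScanCut s)) = true := by
  induction s with
  | nil => left; simp [pvScanCut]
  | cons c rest ih =>
    by_cases hm : pvAnyMarker (c :: rest) = true
    · right; simpa [pvScanCut, hm]
    · simp only [pvScanCut, if_neg hm]
      rcases ih with h | h
      · left; simp [h]
      · right; simpa [List.drop_succ_cons] using h

-- A's min-of-finds over the three markers equals B's first-match scan position
lemma cut_eq (s : List Char) :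
    (["\nreferences", "\nappendix", "\nbibliography"] : List String).foldl
        (fun cut marker =>
          let idx := PySem.Chars.find s marker.toList
          if idx ≠ -1 then min cut idx else cut) (s.length : Int)
      = (pvScanCut s : Int) := by
  simp only [List.foldl]
  have key : ∀ m : List Char,
      (m = "\nreferences".toList ∨ m = "\nappendix".toList ∨ m = "\nbibliography".toList) →
      PySem.Chars.find s m ≠ -1 →
      0 ≤ PySem.Chars.find s m ∧ (pvScanCut s : Int) ≤ PySem.Chars.find s m := by
    intro m hmem h
    have hge : -1 ≤ PySem.Chars.find s m := PySem.Chars.neg_one_le_find s m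
    have h0 : 0 ≤ PySem.Chars.find s m := by omega
    refine ⟨h0, ?_⟩
    obtain ⟨hpre, -⟩ := PySem.Chars.find_spec h0
    have hany : pvAnyMarker (s.drop (PySem.Chars.find s m).toNat) = true := by
      unfold pvAnyMarker
      simp only [Bool.or_eq_true, PySem.Chars.startswith_iff]
      rcases hmem with rfl | rfl | rfl <;> tauto
    have := pvScanCut_le_of_match s _ hany
    omega
  have hscanlen : (pvScanCut s : Int) ≤ (s.length : Int) := by
    exact_mod_cast pvScanCut_le_length s
  have hmatch : (pvScanCut s : Int) = (s.length : Int) ∨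
      (PySem.Chars.find s "\nreferences".toList ≠ -1 ∧
        PySem.Chars.find s "\nreferences".toList ≤ (pvScanCut s : Int)) ∨
      (PySem.Chars.find s "\nappendix".toList ≠ -1 ∧
        PySem.Chars.find s "\nappendix".toList ≤ (pvScanCut s : Int)) ∨
      (PySem.Chars.find s "\nbibliography".toList ≠ -1 ∧
        PySem.Chars.find s "\nbibliography".toList ≤ (pvScanCut s : Int)) := by
    rcases pvScanCut_match_or_len s with h | h
    · exact Or.inl (by exact_mod_cast h)
    · right
      unfold pvAnyMarker at h
      simp only [Bool.or_eq_true, PySem.Chars.startswith_iff] at h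
      have step : ∀ m : List Char, m <+: s.drop (pvScanCut s) →
          PySem.Chars.find s m ≠ -1 ∧ PySem.Chars.find s m ≤ (pvScanCut s : Int) := by
        intro m hpre
        have hne : PySem.Chars.find s m ≠ -1 := by
          rw [Ne, PySem.Chars.find_eq_neg_one_iff, not_not, ← PySem.Chars.isIn_iff_infix,
              ← PySem.Chars.exists_prefix_drop_iff_isIn]
          exact ⟨_, hpre⟩
        have h0 : 0 ≤ PySem.Chars.find s m := by
          have := PySem.Chars.neg_one_le_find s m; omega
        obtain ⟨-, hmin⟩ := PySem.Chars.find_spec h0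
        refine ⟨hne, ?_⟩
        by_contra hlt
        push_neg at hlt
        exact hmin _ (by omega) hpre
      rcases h with (h | h) | h
      · exact Or.inl (step _ h)
      · exact Or.inr (Or.inl (step _ h))
      · exact Or.inr (Or.inr (step _ h))
  have l1 := PySem.Chars.find_le_length s "\nreferences".toList
  have l2 := PySem.Chars.find_le_length s "\nappendix".toList
  have l3 := PySem.Chars.find_le_length s "\nbibliography".toList
  have b1 := fun h => key "\nreferences".toList (Or.inl rfl) h
  have b2 := fun h => key "\nappendix".toList (Or.inr (Or.inl rfl)) h
  have b3 := fun h => key "\nbibliography".toList (Or.inr (Or.inr rfl)) h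
  by_cases h1 : PySem.Chars.find s "\nreferences".toList = -1 <;>
    by_cases h2 : PySem.Chars.find s "\nappendix".toList = -1 <;>
      by_cases h3 : PySem.Chars.find s "\nbibliography".toList = -1 <;>
        [skip; (have B3 := b3 h3); (have B2 := b2 h2); (have B2 := b2 h2; have B3 := b3 h3);
         (have B1 := b1 h1); (have B1 := b1 h1; have B3 := b3 h3);
         (have B1 := b1 h1; have B2 := b2 h2); (have B1 := b1 h1; have B2 := b2 h2; have B3 := b3 h3)] <;>
        simp only [ne_eq, h1, h2, h3, not_true_eq_false, not_false_eq_true, if_true, if_false,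
          ite_true, ite_false] <;>
        rcases hmatch with hm | ⟨hne, hle⟩ | ⟨hne, hle⟩ | ⟨hne, hle⟩ <;>
        omega

lemma length_lower (l : List Char) : (PySem.Chars.lower l).length = l.length := by
  simp [PySem.Chars.lower]

-- ===== VERDICT (by name: the statement is the Claim_ definition above) =====
theorem strip_reference_tail_spec : Claim_equal_strip_reference_tail := by
  intro text _
  unfold Spec_strip_reference_tail strip_reference_tail strip_reference_tail_alt
  simp only [PySem.Str.find_eq, PySem.Str.toList_lower, PySem.Str.len_eq]
  have hcut := cut_eq (PySem.Chars.lower text.toList)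
  rw [length_lower] at hcut
  simp only [List.foldl] at hcut ⊢
  rw [hcut]
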